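-- pv_equiv track=rewrite | github.com/ishan-skit/plant_final_year_project | app.py | getImmediateAction
-- ===== SOURCE A (Python) =====
-- def getImmediateAction(disease_name):
--     """Get immediate action recommendation based on disease name"""
--     if not disease_name:
--         return "Monitor plant condition"
--
--     disease_lower = disease_name.lower()
--
--     # Define immediate actions for different diseases
--     if 'healthy' in disease_lower:
--         return "Continue current care routine"
--     elif any(word in disease_lower for word in ['blight', 'rot', 'wilt']):
--         return "Remove affected leaves immediately and isolate plant"
--     elif any(word in disease_lower for word in ['rust', 'fungal', 'mold']):
--         return "Apply fungicide and improve air circulation"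
--     elif any(word in disease_lower for word in ['spot', 'leaf spot']):
--         return "Reduce watering frequency and remove affected areas"
--     elif any(word in disease_lower for word in ['virus', 'mosaic']):
--         return "Isolate plant immediately - virus may be contagious"
--     elif any(word in disease_lower for word in ['pest', 'insect', 'aphid']):
--         return "Apply insecticidal soap or neem oil treatment"
--     else:
--         return "Isolate plant and consult treatment guide"
-- ===== SOURCE B (Python) =====
-- ACTIONS = [
--     "Continue current care routine",
--     "Remove affected leaves immediately and isolate plant",
--     "Apply fungicide and improve air circulation",
--     "Reduce watering frequency and remove affected areas",
--     "Isolate plant immediately - virus may be contagious",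
--     "Apply insecticidal soap or neem oil treatment",
--     "Isolate plant and consult treatment guide",
-- ]
--
-- KEYWORD_PRIORITY = [
--     ("healthy", 0),
--     ("blight", 1), ("rot", 1), ("wilt", 1),
--     ("rust", 2), ("fungal", 2), ("mold", 2),
--     ("spot", 3), ("leaf spot", 3),
--     ("virus", 4), ("mosaic", 4),
--     ("pest", 5), ("insect", 5), ("aphid", 5),
-- ]
--
-- def getImmediateAction(disease_name):
--     """Get immediate action recommendation based on disease name"""
--     if not disease_name:
--         return "Monitor plant condition"
--     low = disease_name.lower()
--     # best (= minimal) priority over ALL matching keywords; no early exit,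
--     # no branch ordering: precedence is encoded as numeric priorities.
--     idx = 6
--     for kw, pri in KEYWORD_PRIORITY:
--         if kw in low:
--             idx = min(idx, pri)
--     return ACTIONS[idx]
-- ===== Notes on version B (the rewrite author's own statement) =====
-- stated objective: alternative
-- what changed: Replaced the early-return if-elif cascade by a single exhaustive pass that takes the minimum numeric priority over all matching keywords and indexes an action array with it.
import Mathlib
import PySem

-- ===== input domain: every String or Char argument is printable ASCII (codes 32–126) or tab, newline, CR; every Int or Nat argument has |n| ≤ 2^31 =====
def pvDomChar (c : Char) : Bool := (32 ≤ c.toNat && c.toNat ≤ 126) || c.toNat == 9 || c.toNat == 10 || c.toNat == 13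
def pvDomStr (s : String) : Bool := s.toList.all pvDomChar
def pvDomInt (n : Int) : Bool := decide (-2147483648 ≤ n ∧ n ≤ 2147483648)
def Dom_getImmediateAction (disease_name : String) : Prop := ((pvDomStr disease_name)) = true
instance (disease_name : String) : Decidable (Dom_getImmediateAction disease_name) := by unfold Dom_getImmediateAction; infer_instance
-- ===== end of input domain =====

-- B replaces A's early-return if-elif cascade by one exhaustive pass taking the minimum
-- numeric priority over all matching keywords and indexing an action array (alternative algorithm).

-- ===== PORT A =====
def getImmediateAction (disease_name : String) : String :=
  if disease_name = "" then "Monitor plant condition"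
  else
    let disease_lower := PySem.Str.lower disease_name
    if PySem.Str.isIn "healthy" disease_lower then "Continue current care routine"
    else if (["blight", "rot", "wilt"].any fun word => PySem.Str.isIn word disease_lower) then
      "Remove affected leaves immediately and isolate plant"
    else if (["rust", "fungal", "mold"].any fun word => PySem.Str.isIn word disease_lower) then
      "Apply fungicide and improve air circulation"
    else if (["spot", "leaf spot"].any fun word => PySem.Str.isIn word disease_lower) then
      "Reduce watering frequency and remove affected areas"
    else if (["virus", "mosaic"].any fun word => PySem.Str.isIn word disease_lower) then
      "Isolate plant immediately - virus may be contagious"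
    else if (["pest", "insect", "aphid"].any fun word => PySem.Str.isIn word disease_lower) then
      "Apply insecticidal soap or neem oil treatment"
    else "Isolate plant and consult treatment guide"

-- ===== PORT B =====
def actionsB : List String :=
  [ "Continue current care routine",
    "Remove affected leaves immediately and isolate plant",
    "Apply fungicide and improve air circulation",
    "Reduce watering frequency and remove affected areas",
    "Isolate plant immediately - virus may be contagious",
    "Apply insecticidal soap or neem oil treatment",
    "Isolate plant and consult treatment guide" ]

def keywordPriority : List (String × Nat) :=
  [ ("healthy", 0),
    ("blight", 1), ("rot", 1), ("wilt", 1),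
    ("rust", 2), ("fungal", 2), ("mold", 2),
    ("spot", 3), ("leaf spot", 3),
    ("virus", 4), ("mosaic", 4),
    ("pest", 5), ("insect", 5), ("aphid", 5) ]

-- the accumulator loop of Source B: idx = min(idx, pri) for every matching keyword
def minIdx (low : String) : List (String × Nat) → Nat → Nat
  | [], m => m
  | (kw, g) :: rest, m =>
      minIdx low rest (if PySem.Str.isIn kw low then min m g else m)

def getImmediateAction_alt (disease_name : String) : String :=
  if disease_name = "" then "Monitor plant condition"
  else
    let low := PySem.Str.lower disease_name
    actionsB.getD (minIdx low keywordPriority 6) ""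

-- ===== PRECONDITION & SPEC =====
def Spec_getImmediateAction (disease_name : String) (out : String) : Prop := out = getImmediateAction_alt disease_name
instance (disease_name : String) (out : String) : Decidable (Spec_getImmediateAction disease_name out) := by unfold Spec_getImmediateAction; infer_instance

-- ===== CLAIM (what is proved, stated in full; the proofs are below) =====
def Claim_equal_getImmediateAction : Prop := ∀ (disease_name : String), Dom_getImmediateAction disease_name → Spec_getImmediateAction disease_name (getImmediateAction disease_name)

-- ===== LEMMAS AND PROOFS =====

-- a run of three keywords with the same priority collapses to one conditional min
theorem minIdx_group3 (low k1 k2 k3 : String) (g : Nat) (rest : List (String × Nat)) (m : Nat) :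
    minIdx low ((k1, g) :: (k2, g) :: (k3, g) :: rest) m
      = minIdx low rest
          (if (PySem.Str.isIn k1 low || (PySem.Str.isIn k2 low || PySem.Str.isIn k3 low)) then min m g else m) := by
  simp only [minIdx]
  congr 1
  split_ifs <;> first | rfl | omega | simp_all

theorem minIdx_group2 (low k1 k2 : String) (g : Nat) (rest : List (String × Nat)) (m : Nat) :
    minIdx low ((k1, g) :: (k2, g) :: rest) m
      = minIdx low rest
          (if (PySem.Str.isIn k1 low || PySem.Str.isIn k2 low) then min m g else m) := by
  simp only [minIdx]
  congr 1
  split_ifs <;> first | rfl | omega | simp_all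

theorem minIdx_group1 (low k1 : String) (g : Nat) (rest : List (String × Nat)) (m : Nat) :
    minIdx low ((k1, g) :: rest) m
      = minIdx low rest (if PySem.Str.isIn k1 low then min m g else m) := rfl

-- ===== VERDICT (by name: the statement is the Claim_ definition above) =====
theorem getImmediateAction_spec : Claim_equal_getImmediateAction := by
  intro s _
  unfold Spec_getImmediateAction getImmediateAction getImmediateAction_alt
  by_cases h : s = ""
  · simp [h]
  · simp only [h, if_false, keywordPriority]
    rw [minIdx_group1, minIdx_group3, minIdx_group3, minIdx_group2, minIdx_group2, minIdx_group3]
    simp only [minIdx, List.any_cons, List.any_nil, Bool.or_false]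
    split_ifs <;> rfl
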